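-- pv_equiv track=rewrite | github.com/zby152/codes | python/蓝桥杯/基础算法/日志统计.py | check
-- ===== SOURCE A (Python) =====
-- def check(d, k, ts_):
--     for x in ts_:
--         count = 0
--         for y in ts_:
--             if x <= y and y < x + d:
--                 count += 1
--             if count >= k:
--                 return True
--     return False
-- ===== SOURCE B (Python) =====
-- def check(d, k, ts_):
--     # Sort once, then slide a two-pointer window: for each start s[i],
--     # advance j to the first index with s[j] >= s[i] + d.
--     s = sorted(ts_)
--     n = len(s)
--     j = 0
--     for i in range(n):
--         while j < n and s[j] < s[i] + d:
--             j += 1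
--         if j - i >= k:
--             return True
--     return False
-- ===== Notes on version B (the rewrite author's own statement) =====
-- stated objective: faster
-- what changed: Replaced the quadratic all-pairs window counting with sort + a sliding two-pointer scan over the sorted timestamps.
import Mathlib
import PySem

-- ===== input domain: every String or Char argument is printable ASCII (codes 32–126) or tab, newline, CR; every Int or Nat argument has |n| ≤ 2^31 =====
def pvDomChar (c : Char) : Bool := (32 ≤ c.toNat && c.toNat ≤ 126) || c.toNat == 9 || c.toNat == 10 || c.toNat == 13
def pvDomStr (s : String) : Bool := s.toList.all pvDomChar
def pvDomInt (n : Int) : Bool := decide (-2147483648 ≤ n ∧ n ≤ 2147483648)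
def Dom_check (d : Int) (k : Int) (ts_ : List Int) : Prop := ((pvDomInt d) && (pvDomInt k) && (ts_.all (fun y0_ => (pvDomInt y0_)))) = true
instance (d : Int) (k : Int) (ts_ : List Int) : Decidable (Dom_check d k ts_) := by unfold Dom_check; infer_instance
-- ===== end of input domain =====

-- B replaces A's quadratic all-pairs window count with sort + a sliding two-pointer scan (asymptotically faster).


-- ===== PORT A =====
-- inner 'for y in ts_' loop, carrying 'count'; early return True becomes the value true
def checkInner (d : Int) (k : Int) (x : Int) : List Int → Int → Bool
  | [], _ => false
  | y :: rest, count =>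
    let c := if x ≤ y ∧ y < x + d then count + 1 else count
    if k ≤ c then true else checkInner d k x rest c

-- outer 'for x in ts_' loop
def checkOuter (d : Int) (k : Int) (ts : List Int) : List Int → Bool
  | [] => false
  | x :: rest => if checkInner d k x ts 0 then true else checkOuter d k ts rest

def check (d : Int) (k : Int) (ts_ : List Int) : Bool :=
  checkOuter d k ts_ ts_

-- ===== PORT B =====
-- 'while j < n and s[j] < t: j += 1' ; fuel = n bounds the number of steps
def whileAdv (s : List Int) (t : Int) : Nat → Nat → Nat
  | 0, j => j
  | fuel + 1, j => if j < s.length ∧ s.getD j 0 < t then whileAdv s t fuel (j + 1) else j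

-- 'for i in range(n)' loop carrying the two-pointer j; early return True becomes true
def altLoop (s : List Int) (d : Int) (k : Int) : List Nat → Nat → Bool
  | [], _ => false
  | i :: rest, j =>
    let j' := whileAdv s (s.getD i 0 + d) s.length j
    if k ≤ (j' : Int) - (i : Int) then true else altLoop s d k rest j'

def check_alt (d : Int) (k : Int) (ts_ : List Int) : Bool :=
  let s := PySem.List.sorted ts_ (fun x => x) false
  altLoop s d k (List.range s.length) 0

-- ===== PRECONDITION & SPEC =====
def Spec_check (d : Int) (k : Int) (ts_ : List Int) (out : Bool) : Prop := out = check_alt d k ts_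
instance (d : Int) (k : Int) (ts_ : List Int) (out : Bool) : Decidable (Spec_check d k ts_ out) := by unfold Spec_check; infer_instance

-- ===== CLAIM (what is proved, stated in full; the proofs are below) =====
def Claim_equal_check : Prop := ∀ (d : Int) (k : Int) (ts_ : List Int), Dom_check d k ts_ → Spec_check d k ts_ (check d k ts_)

-- ===== LEMMAS AND PROOFS =====

-- number of elements below t / inside the window [x, x+d)
def cntLT (s : List Int) (t : Int) : Nat := s.countP (fun y => decide (y < t))
def cntW (s : List Int) (d : Int) (x : Int) : Nat := s.countP (fun y => decide (x ≤ y ∧ y < x + d))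

theorem cntLT_le_length (s : List Int) (t : Int) : cntLT s t ≤ s.length :=
  List.countP_le_length

theorem cntLT_mono (s : List Int) {t t' : Int} (h : t ≤ t') : cntLT s t ≤ cntLT s t' := by
  unfold cntLT
  exact List.countP_mono_left (fun a _ ha => by simp_all; omega)

-- in a (≤)-sorted list, the elements below t occupy exactly the first (cntLT s t) positions
theorem sorted_getD_lt_iff (s : List Int) (t : Int) (hs : s.Pairwise (· ≤ ·)) :
    ∀ j, j < s.length → (s.getD j 0 < t ↔ j < cntLT s t) := by
  induction s with
  | nil => intro j hj; simp at hj
  | cons a rest ih =>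
    rcases List.pairwise_cons.mp hs with ⟨ha, hrest⟩
    intro j hj
    have hz : ¬ a < t → cntLT (a :: rest) t = 0 := by
      intro hat
      unfold cntLT
      rw [List.countP_eq_zero]
      intro y hy
      rcases List.mem_cons.mp hy with h | h
      · simp [h]; omega
      · have := ha y h; simp; omega
    cases j with
    | zero =>
      simp only [List.getD_cons_zero]
      constructor
      · intro h
        unfold cntLT; rw [List.countP_cons]; simp [h]
      · intro h
        by_contra hat
        rw [hz hat] at h; omega
    | succ j =>
      simp only [List.getD_cons_succ]
      have hj' : j < rest.length := by simpa using hj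
      rw [ih hrest j hj']
      by_cases hat : a < t
      · have : cntLT (a :: rest) t = cntLT rest t + 1 := by
          unfold cntLT; rw [List.countP_cons]; simp [hat]
        omega
      · have h0 : cntLT (a :: rest) t = 0 := hz hat
        have h1 : cntLT rest t = 0 := by
          unfold cntLT at h0 ⊢; rw [List.countP_cons] at h0; omega
        omega

-- the while loop lands exactly on cntLT s t
theorem whileAdv_eq (s : List Int) (t : Int) (hs : s.Pairwise (· ≤ ·)) :
    ∀ (fuel j : Nat), j ≤ cntLT s t → cntLT s t ≤ j + fuel → whileAdv s t fuel j = cntLT s t := by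
  intro fuel
  induction fuel with
  | zero => intro j h1 h2; unfold whileAdv; omega
  | succ fuel ih =>
    intro j h1 h2
    unfold whileAdv
    split_ifs with h
    · have hlt : j < cntLT s t := (sorted_getD_lt_iff s t hs j h.1).mp h.2
      exact ih (j + 1) hlt (by omega)
    · have : ¬ j < cntLT s t := by
        intro hlt
        have hjl : j < s.length := lt_of_lt_of_le hlt (cntLT_le_length s t)
        exact h ⟨hjl, (sorted_getD_lt_iff s t hs j hjl).mpr hlt⟩
      omega

-- the outer two-pointer loop is 'any' over the window counts
theorem altLoop_any (s : List Int) (d k : Int) (hs : s.Pairwise (· ≤ ·)) :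
    ∀ (is : List Nat) (j : Nat),
      (∀ i ∈ is, j ≤ cntLT s (s.getD i 0 + d)) →
      is.Pairwise (fun a b => s.getD a 0 ≤ s.getD b 0) →
      (altLoop s d k is j = true ↔
        ∃ i ∈ is, k ≤ (cntLT s (s.getD i 0 + d) : Int) - (i : Int)) := by
  intro is
  induction is with
  | nil => intro j _ _; simp [altLoop]
  | cons i rest ih =>
    intro j hj hpw
    rcases List.pairwise_cons.mp hpw with ⟨hi, hrest⟩
    have hji : j ≤ cntLT s (s.getD i 0 + d) := hj i (List.mem_cons_self)
    have hfuel : cntLT s (s.getD i 0 + d) ≤ j + s.length :=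
      le_trans (cntLT_le_length s _) (by omega)
    have hwa : whileAdv s (s.getD i 0 + d) s.length j = cntLT s (s.getD i 0 + d) :=
      whileAdv_eq s _ hs s.length j hji hfuel
    have hj' : ∀ i' ∈ rest, cntLT s (s.getD i 0 + d) ≤ cntLT s (s.getD i' 0 + d) := by
      intro i' hi'
      exact cntLT_mono s (by have := hi i' hi'; omega)
    show (if k ≤ ((whileAdv s (s.getD i 0 + d) s.length j : Nat) : Int) - (i : Int) then true
      else altLoop s d k rest (whileAdv s (s.getD i 0 + d) s.length j)) = true ↔ _
    rw [hwa]
    split_ifs with hk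
    · simp only [true_iff]
      exact ⟨i, List.mem_cons_self, hk⟩
    · rw [ih (cntLT s (s.getD i 0 + d)) hj' hrest]
      constructor
      · rintro ⟨i', hi', hk'⟩; exact ⟨i', List.mem_cons_of_mem _ hi', hk'⟩
      · rintro ⟨i', hi', hk'⟩
        rcases List.mem_cons.mp hi' with h | h
        · subst h; exact absurd hk' hk
        · exact ⟨i', h, hk'⟩

-- A's inner loop returns true iff the full window count reaches k (count only grows)
theorem inner_char (d k x : Int) :
    ∀ (ys : List Int) (c : Int),
      (checkInner d k x ys c = true ↔
        ys ≠ [] ∧ k ≤ c + (ys.countP (fun y => decide (x ≤ y ∧ y < x + d)) : Int)) := by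
  intro ys
  induction ys with
  | nil => intro c; simp [checkInner]
  | cons y rest ih =>
    intro c
    simp only [checkInner]
    by_cases hw : x ≤ y ∧ y < x + d
    · rw [if_pos hw]
      have hcnt : (y :: rest).countP (fun y => decide (x ≤ y ∧ y < x + d))
          = rest.countP (fun y => decide (x ≤ y ∧ y < x + d)) + 1 := by
        rw [List.countP_cons]; simp [hw]
      rw [hcnt]
      split_ifs with hk
      · simp only [true_iff]
        exact ⟨by simp, by push_cast; omega⟩
      · rw [ih (c + 1)]
        constructor
        · rintro ⟨-, h⟩
          exact ⟨by simp, by push_cast at h ⊢; omega⟩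

        · rintro ⟨-, h⟩
          push_cast at h
          refine ⟨?_, by push_cast; omega⟩
          intro hnil
          subst hnil
          simp at h
          omega
    · rw [if_neg hw]
      have hcnt : (y :: rest).countP (fun y => decide (x ≤ y ∧ y < x + d))
          = rest.countP (fun y => decide (x ≤ y ∧ y < x + d)) := by
        rw [List.countP_cons]; simp [hw]
      rw [hcnt]
      split_ifs with hk
      · simp only [true_iff]
        exact ⟨by simp, by omega⟩
      · rw [ih c]
        constructor
        · rintro ⟨-, h⟩
          exact ⟨by simp, h⟩
        · rintro ⟨-, h⟩
          refine ⟨?_, h⟩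
          intro hnil
          subst hnil
          simp at h
          omega

theorem outer_any (d k : Int) (ts : List Int) :
    ∀ xs, checkOuter d k ts xs = xs.any (fun x => checkInner d k x ts 0) := by
  intro xs
  induction xs with
  | nil => simp [checkOuter]
  | cons x rest ih =>
    simp only [checkOuter, List.any_cons, ih]
    split_ifs with h <;> simp [h]

-- A returns true iff some timestamp's window holds ≥ k timestamps
theorem A_char (d k : Int) (ts : List Int) :
    check d k ts = true ↔ ∃ x ∈ ts, k ≤ (cntW ts d x : Int) := by
  unfold check
  rw [outer_any, List.any_eq_true]
  constructor
  · rintro ⟨x, hx, h⟩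
    rcases (inner_char d k x ts 0).mp h with ⟨-, hk⟩
    exact ⟨x, hx, by unfold cntW; omega⟩
  · rintro ⟨x, hx, hk⟩
    refine ⟨x, hx, (inner_char d k x ts 0).mpr ⟨List.ne_nil_of_mem hx, ?_⟩⟩
    unfold cntW at hk; omega

-- for d ≥ 0 the elements below x+d split into those below x and those in the window
theorem cnt_split (s : List Int) (d x : Int) (hd : 0 ≤ d) :
    cntLT s (x + d) = cntLT s x + cntW s d x := by
  induction s with
  | nil => simp [cntLT, cntW]
  | cons y rest ih =>
    unfold cntLT cntW at *
    rw [List.countP_cons, List.countP_cons, List.countP_cons]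
    simp only [Bool.decide_and] at ih ⊢
    by_cases h1 : y < x + d <;> by_cases h2 : y < x <;> by_cases h3 : x ≤ y <;>
      simp [h1, h2, h3] <;> omega

theorem cntW_zero_of_neg (s : List Int) (d x : Int) (hd : d < 0) : cntW s d x = 0 := by
  unfold cntW
  rw [List.countP_eq_zero]
  intro y _
  simp; omega

-- x ∈ s sorted: position cntLT s x is the first occurrence of x
theorem first_index (s : List Int) (x : Int) (hs : s.Pairwise (· ≤ ·))
    (hmono : ∀ p q : Nat, p ≤ q → q < s.length → s.getD p 0 ≤ s.getD q 0)
    (hx : x ∈ s) : cntLT s x < s.length ∧ s.getD (cntLT s x) 0 = x := by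
  have hlt : cntLT s x < s.length := by
    rcases lt_or_eq_of_le (cntLT_le_length s x) with h | h
    · exact h
    · exfalso
      unfold cntLT at h
      have := List.countP_eq_length.mp h x hx
      simp at this
  refine ⟨hlt, ?_⟩
  have hge : ¬ s.getD (cntLT s x) 0 < x := by
    intro h
    have := (sorted_getD_lt_iff s x hs (cntLT s x) hlt).mp h
    omega
  rcases List.mem_iff_getElem.mp hx with ⟨m, hm, hmx⟩
  have hsm : s.getD m 0 = x := by rw [List.getD_eq_getElem s 0 hm]; exact hmx
  have hle : s.getD (cntLT s x) 0 ≤ x := by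
    by_cases hcm : cntLT s x ≤ m
    · have := hmono (cntLT s x) m hcm hm
      omega
    · exfalso
      have hnm : ¬ m < cntLT s x := by
        intro hmc
        have := (sorted_getD_lt_iff s x hs m hm).mpr hmc
        omega
      omega
  omega

-- the bridge: A's existential over timestamps equals B's existential over sorted positions
theorem bridge (d k : Int) (ts : List Int) :
    (∃ x ∈ ts, k ≤ (cntW ts d x : Int)) ↔
    (∃ i ∈ List.range (PySem.List.sorted ts (fun x => x) false).length,
      k ≤ (cntLT (PySem.List.sorted ts (fun x => x) false)
            ((PySem.List.sorted ts (fun x => x) false).getD i 0 + d) : Int) - (i : Int)) := by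
  set s := PySem.List.sorted ts (fun x => x) false with hsdef
  have hperm : s.Perm ts := PySem.List.sorted_perm ts (fun x => x) false
  have hs : s.Pairwise (· ≤ ·) := by
    have := PySem.List.sorted_pairwise (xs := ts) (key := fun x => x)
    simpa [hsdef] using this
  have hmono : ∀ p q : Nat, p ≤ q → q < s.length → s.getD p 0 ≤ s.getD q 0 := by
    intro p q hpq hq
    rw [List.getD_eq_getElem s 0 (lt_of_le_of_lt hpq hq), List.getD_eq_getElem s 0 hq]
    exact PySem.List.sorted_id_getElem_mono (xs := ts) hpq hq
  have hcw : ∀ x, cntW ts d x = cntW s d x := by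
    intro x; unfold cntW; exact (hperm.countP_eq _).symm
  constructor
  · rintro ⟨x, hx, hk⟩
    have hxs : x ∈ s := hperm.mem_iff.mpr hx
    rw [hcw x] at hk
    by_cases hd : 0 ≤ d
    · rcases first_index s x hs hmono hxs with ⟨hlt, hgd⟩
      refine ⟨cntLT s x, List.mem_range.mpr hlt, ?_⟩
      rw [hgd, cnt_split s d x hd]
      push_cast
      omega
    · push_neg at hd
      have hlen : 0 < s.length := List.length_pos_of_mem hxs
      refine ⟨0, List.mem_range.mpr hlen, ?_⟩
      have h0 : cntW s d x = 0 := cntW_zero_of_neg s d x hd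
      have : (0 : Int) ≤ (cntLT s (s.getD 0 0 + d) : Int) := by positivity
      omega
  · rintro ⟨i, hi, hk⟩
    have hi' : i < s.length := List.mem_range.mp hi
    set x := s.getD i 0 with hxdef
    have hxs : x ∈ s := by
      rw [hxdef, List.getD_eq_getElem s 0 hi']
      exact List.getElem_mem hi'
    have hcx : cntLT s x ≤ i := by
      have := (sorted_getD_lt_iff s x hs i hi').mp
      by_contra h
      push_neg at h
      have hxlt : s.getD i 0 < x := (sorted_getD_lt_iff s x hs i hi').mpr h
      rw [← hxdef] at hxlt
      omega
    refine ⟨x, hperm.mem_iff.mp hxs, ?_⟩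
    rw [hcw x]
    by_cases hd : 0 ≤ d
    · rw [cnt_split s d x hd] at hk
      push_cast at hk ⊢
      omega
    · push_neg at hd
      have h0 : cntW s d x = 0 := cntW_zero_of_neg s d x hd
      have hmle : cntLT s (x + d) ≤ cntLT s x := cntLT_mono s (by omega)
      omega

theorem B_char (d k : Int) (ts : List Int) :
    check_alt d k ts = true ↔
    (∃ i ∈ List.range (PySem.List.sorted ts (fun x => x) false).length,
      k ≤ (cntLT (PySem.List.sorted ts (fun x => x) false)
            ((PySem.List.sorted ts (fun x => x) false).getD i 0 + d) : Int) - (i : Int)) := by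
  unfold check_alt
  set s := PySem.List.sorted ts (fun x => x) false with hsdef
  have hs : s.Pairwise (· ≤ ·) := by
    have := PySem.List.sorted_pairwise (xs := ts) (key := fun x => x)
    simpa [hsdef] using this
  apply altLoop_any s d k hs (List.range s.length) 0
  · intro i _; omega
  · refine List.Pairwise.imp_of_mem ?_ (List.pairwise_lt_range (n := s.length))
    intro a b ha hb hab
    have hb' : b < s.length := List.mem_range.mp hb
    have ha' : a < s.length := by omega
    rw [List.getD_eq_getElem s 0 ha', List.getD_eq_getElem s 0 hb']
    exact PySem.List.sorted_id_getElem_mono (xs := ts) (le_of_lt hab) hb'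

-- ===== VERDICT (by name: the statement is the Claim_ definition above) =====
theorem check_spec : Claim_equal_check := by
  intro d k ts _
  unfold Spec_check
  rw [Bool.eq_iff_iff, A_char, B_char, bridge]
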